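-- pv_equiv track=rewrite | github.com/typroj/youtube-automation | analytics_tracker.py | _tag_niche
-- ===== SOURCE A (Python) =====
-- def _tag_niche(caption: str, niche_config: dict) -> str:
--     """Map a reel caption to the best-matching niche by keyword count."""
--     text   = (caption or "").lower()
--     scores = {}
--     for niche, cfg in niche_config.items():
--         hits = sum(1 for s in cfg.get("seeds", []) if s.lower() in text)
--         if hits:
--             scores[niche] = hits
--     return max(scores, key=scores.get) if scores else "unknown"
-- ===== SOURCE B (Python) =====
-- def _tag_niche(caption: str, niche_config: dict) -> str:
--     """Score every niche, stable-sort descending by hit count, read the winner off the head."""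
--     text = (caption or "").lower()
--     scored = [
--         (niche, sum(1 for s in cfg.get("seeds", []) if s.lower() in text))
--         for niche, cfg in niche_config.items()
--     ]
--     ranked = sorted(scored, key=lambda t: -t[1])  # stable: insertion order breaks ties
--     if ranked and ranked[0][1] > 0:
--         return ranked[0][0]
--     return "unknown"
-- ===== Notes on version B (the rewrite author's own statement) =====
-- stated objective: alternative
-- what changed: Replaced A's build-a-positive-scores-dict-then-max(key=scores.get) structure by sort-then-scan: score every niche into a list, stable-sort it descending by hit count (stability preserves A's first-in-insertion-order tie-break), and return the head niche if its count is positive, else 'unknown'.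
import Mathlib
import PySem

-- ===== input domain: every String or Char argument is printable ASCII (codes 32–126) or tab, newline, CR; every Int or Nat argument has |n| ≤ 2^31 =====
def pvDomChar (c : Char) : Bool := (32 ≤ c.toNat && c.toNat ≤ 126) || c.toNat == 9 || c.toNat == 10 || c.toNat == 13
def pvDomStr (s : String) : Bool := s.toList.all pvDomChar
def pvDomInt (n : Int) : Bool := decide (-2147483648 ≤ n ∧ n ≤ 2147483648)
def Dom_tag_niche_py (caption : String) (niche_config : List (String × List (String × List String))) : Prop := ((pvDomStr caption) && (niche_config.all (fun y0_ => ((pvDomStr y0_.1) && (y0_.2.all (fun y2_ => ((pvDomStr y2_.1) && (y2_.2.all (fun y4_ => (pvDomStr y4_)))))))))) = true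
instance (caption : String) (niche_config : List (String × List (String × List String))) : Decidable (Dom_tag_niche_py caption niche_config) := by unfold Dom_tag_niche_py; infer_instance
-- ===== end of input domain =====

-- B replaces A's build-a-positive-scores-dict-then-max structure by sort-then-scan: score every
-- niche into a list, stable-sort it descending by hit count, read the winner off the head.

-- ===== PORT A =====
-- literal port of A: build a dict of positive hit counts, then max over its keys with key = scores.get
def tag_niche_py (caption : String) (niche_config : List (String × List (String × List String))) : String :=
  let text := PySem.Str.lower caption
  let scores : PySem.Dict String Int :=
    niche_config.foldl (fun scores p =>
      let hits : Int := ((PySem.Dict.mk p.2).getD "seeds" []).foldl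
        (fun acc s => if PySem.Str.isIn (PySem.Str.lower s) text then acc + 1 else acc) 0
      if hits ≠ 0 then scores.insert p.1 hits else scores) PySem.Dict.empty
  -- max(scores, key=scores.get) if scores else "unknown": max? is none exactly when scores is empty
  (PySem.List.max? scores.keys (fun k => scores.getD k 0)).getD "unknown"

-- ===== PORT B =====
-- literal port of B: score list, stable sort by -hits, then head check
def tag_niche_py_alt (caption : String) (niche_config : List (String × List (String × List String))) : String :=
  let text := PySem.Str.lower caption
  let scored : List (String × Int) :=
    niche_config.map (fun p =>
      (p.1, ((PySem.Dict.mk p.2).getD "seeds" []).foldl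
        (fun acc s => if PySem.Str.isIn (PySem.Str.lower s) text then acc + 1 else acc) 0))
  let ranked := PySem.List.sorted scored (fun t => -t.2)
  -- 'if ranked and ranked[0][1] > 0: return ranked[0][0]; return "unknown"'
  match ranked with
  | [] => "unknown"
  | t :: _ => if 0 < t.2 then t.1 else "unknown"

-- ===== PRECONDITION & SPEC =====
-- niche_config models a Python dict, whose keys are necessarily distinct; Pre_ only states that model
-- assumption and excludes no input the Python A can actually receive.
def Pre_tag_niche_py (caption : String) (niche_config : List (String × List (String × List String))) : Prop :=
  (niche_config.map Prod.fst).Nodup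
instance (caption : String) (niche_config : List (String × List (String × List String))) : Decidable (Pre_tag_niche_py caption niche_config) := by unfold Pre_tag_niche_py; infer_instance

def pvWitness_tag_niche_py : String × (List (String × List (String × List String))) :=
  ("get fit now", [("fitness", [("seeds", ["fit", "gym"])]), ("food", [("seeds", ["cook"])])])

def Spec_tag_niche_py (caption : String) (niche_config : List (String × List (String × List String))) (out : String) : Prop := out = tag_niche_py_alt caption niche_config
instance (caption : String) (niche_config : List (String × List (String × List String))) (out : String) : Decidable (Spec_tag_niche_py caption niche_config out) := by unfold Spec_tag_niche_py; infer_instance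

-- ===== CLAIM (what is proved, stated in full; the proofs are below) =====
def Claim_equal_tag_niche_py : Prop := ∀ (caption : String) (niche_config : List (String × List (String × List String))), Dom_tag_niche_py caption niche_config → Pre_tag_niche_py caption niche_config → Spec_tag_niche_py caption niche_config (tag_niche_py caption niche_config)

-- ===== LEMMAS AND PROOFS =====

-- the per-niche hit count both programs compute
def pvHits (text : String) (p : String × List (String × List String)) : Int :=
  (((PySem.Dict.mk p.2).getD "seeds" []).countP
    (fun s => PySem.Str.isIn (PySem.Str.lower s) text) : Nat)

theorem pvHits_nonneg (text : String) (p : String × List (String × List String)) : 0 ≤ pvHits text p := by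
  simp [pvHits]

-- the generator-sum both ports write is pvHits
theorem hits_eq (text : String) (p : String × List (String × List String)) :
    ((PySem.Dict.mk p.2).getD "seeds" []).foldl
      (fun acc s => if PySem.Str.isIn (PySem.Str.lower s) text then acc + 1 else acc) (0 : Int)
      = pvHits text p := by
  rw [PySem.List.foldl_if_add_one]
  simp [pvHits]

-- A's dict-building loop over fresh distinct keys appends exactly the positive-hit pairs
theorem scores_items (text : String) :
    ∀ (l : List (String × List (String × List String))) (d : PySem.Dict String Int),
      (l.map Prod.fst).Nodup → (∀ p ∈ l, d.contains p.1 = false) →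
      (l.foldl (fun sc p => if pvHits text p ≠ 0 then sc.insert p.1 (pvHits text p) else sc) d).items
        = d.items ++ (l.filter (fun p => pvHits text p != 0)).map (fun p => (p.1, pvHits text p)) := by
  intro l
  induction l with
  | nil => intro d _ _; simp
  | cons a t ih =>
    intro d hnd hfresh
    simp only [List.map_cons, List.nodup_cons] at hnd
    by_cases h0 : pvHits text a ≠ 0
    · have hfa : d.contains a.1 = false := hfresh a (by simp)
      have hstep : ∀ p ∈ t, (d.insert a.1 (pvHits text a)).contains p.1 = false := by
        intro p hp
        rw [PySem.Dict.contains_insert]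
        have : p.1 ≠ a.1 := by
          intro he; exact hnd.1 (he ▸ List.mem_map_of_mem hp)
        simp [this, hfresh p (List.mem_cons_of_mem _ hp)]
      simp only [List.foldl_cons, if_pos h0]
      rw [ih _ hnd.2 hstep, PySem.Dict.items_insert_of_not_contains _ _ hfa]
      simp [h0]
    · simp only [List.foldl_cons, if_neg h0]
      rw [ih _ hnd.2 (fun p hp => hfresh p (List.mem_cons_of_mem _ hp))]
      simp at h0
      simp [h0]

-- B's positive-hit filter is harmless on A's side too: zero-hit niches never win the running argmax
theorem fold_filter (text : String) :
    ∀ (l : List (String × List (String × List String))) (b : String × Int), 0 ≤ b.2 →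
      l.foldl (fun best p => if best.2 < pvHits text p then (p.1, pvHits text p) else best) b
        = (l.filter (fun p => pvHits text p != 0)).foldl
            (fun best p => if best.2 < pvHits text p then (p.1, pvHits text p) else best) b := by
  intro l
  induction l with
  | nil => intro b _; rfl
  | cons a t ih =>
    intro b hb
    by_cases h0 : pvHits text a = 0
    · have hlt : ¬ b.2 < pvHits text a := by rw [h0]; omega
      simp only [List.foldl_cons]
      rw [if_neg hlt]
      have hfc : (pvHits text a != 0) = false := by simpa using h0
      simp only [List.filter_cons, hfc, Bool.false_eq_true, if_false]
      exact ih b hb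
    · have hfc : (pvHits text a != 0) = true := by simpa using h0
      simp only [List.filter_cons, hfc, if_true, List.foldl_cons]
      by_cases hlt : b.2 < pvHits text a
      · rw [if_pos hlt]; exact ih _ (pvHits_nonneg text a)
      · rw [if_neg hlt]; exact ih b hb

-- PySem.List.max? as a fold with a named step function (same computation, nameable in lemmas)
def maxStep (g : String → Int) (acc : Option String) (k : String) : Option String :=
  match acc with
  | none => some k
  | some mx => if g mx < g k then some k else some mx

theorem max?_eq_foldl (g : String → Int) (xs : List String) :
    PySem.List.max? xs g = xs.foldl (maxStep g) none := by
  unfold PySem.List.max?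
  congr 1
  funext acc k
  cases acc <;> rfl

-- coupled induction: A's max? fold over the keys (with lookup g) tracks the running argmax over the pairs
theorem couple (text : String) (g : String → Int) :
    ∀ (t : List (String × List (String × List String))) (b : String × Int),
      (∀ p ∈ t, g p.1 = pvHits text p) → g b.1 = b.2 →
      (t.map Prod.fst).foldl (maxStep g) (some b.1)
        = some ((t.foldl (fun best p => if best.2 < pvHits text p then (p.1, pvHits text p) else best) b).1) := by
  intro t
  induction t with
  | nil => intro b _ _; rfl
  | cons a t ih =>
    intro b hg hb
    have ha : g a.1 = pvHits text a := hg a (by simp)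
    simp only [List.map_cons, List.foldl_cons, maxStep]
    by_cases hlt : b.2 < pvHits text a
    · have hglt : g b.1 < g a.1 := by rw [hb, ha]; exact hlt
      rw [if_pos hglt, if_pos hlt]
      exact ih (a.1, pvHits text a) (fun p hp => hg p (List.mem_cons_of_mem _ hp)) ha
    · have hglt : ¬ g b.1 < g a.1 := by rw [hb, ha]; exact hlt
      rw [if_neg hglt, if_neg hlt]
      exact ih b (fun p hp => hg p (List.mem_cons_of_mem _ hp)) hb

-- the selection over the positive-hit list: A's max?-over-keys equals the running argmax
theorem select_eq (text : String) (g : String → Int) :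
    ∀ (m : List (String × List (String × List String))),
      (∀ p ∈ m, g p.1 = pvHits text p) → (∀ p ∈ m, pvHits text p ≠ 0) →
      ((m.map Prod.fst).foldl (maxStep g) none).getD "unknown"
        = (m.foldl (fun best p => if best.2 < pvHits text p then (p.1, pvHits text p) else best)
            ("unknown", 0)).1 := by
  intro m hg hpos
  cases m with
  | nil => rfl
  | cons p t =>
    have hp0 : (0 : Int) < pvHits text p :=
      lt_of_le_of_ne (pvHits_nonneg text p) (Ne.symm (hpos p (by simp)))
    simp only [List.map_cons, List.foldl_cons, maxStep, if_pos hp0]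
    rw [couple text g t (p.1, pvHits text p)
          (fun q hq => hg q (List.mem_cons_of_mem _ hq)) (hg p (by simp))]
    rfl

-- A (under Pre_) computes the running argmax over all niches
theorem A_eq_argmax (caption : String) (l : List (String × List (String × List String)))
    (hpre : (l.map Prod.fst).Nodup) :
    tag_niche_py caption l
      = (l.foldl (fun best p =>
            if best.2 < pvHits (PySem.Str.lower caption) p then (p.1, pvHits (PySem.Str.lower caption) p) else best)
          ("unknown", 0)).1 := by
  unfold tag_niche_py
  simp only [hits_eq]
  set text := PySem.Str.lower caption with htext
  have hitems := scores_items text l PySem.Dict.empty hpre (by intro p _; simp)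
  set scores := l.foldl (fun sc p => if pvHits text p ≠ 0 then sc.insert p.1 (pvHits text p) else sc) PySem.Dict.empty with hs
  set m := l.filter (fun p => pvHits text p != 0) with hm
  have hitems' : scores.items = m.map (fun p => (p.1, pvHits text p)) := by
    simpa using hitems
  have hkeys : scores.keys = m.map Prod.fst := by
    simp [PySem.Dict.keys, hitems', Function.comp]
  have hmnodup : (m.map Prod.fst).Nodup := by
    rw [hm]
    exact ((List.filter_sublist).map Prod.fst).nodup hpre
  have hknodup : scores.keys.Nodup := by rw [hkeys]; exact hmnodup
  have hg : ∀ p ∈ m, scores.getD p.1 0 = pvHits text p := by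
    intro p hp
    have : (p.1, pvHits text p) ∈ scores.items := by
      rw [hitems']; exact List.mem_map_of_mem hp
    rw [PySem.Dict.getD_eq_get?_getD, PySem.Dict.get?_of_mem_items _ this hknodup]
    rfl
  have hpos : ∀ p ∈ m, pvHits text p ≠ 0 := by
    intro p hp
    rw [hm] at hp
    simpa using (List.of_mem_filter hp)
  rw [fold_filter text l ("unknown", 0) (by norm_num), ← hm]
  rw [← select_eq text (fun k => scores.getD k 0) m hg hpos, ← hkeys,
    ← max?_eq_foldl (fun k => scores.getD k 0) scores.keys]

-- B-side machinery: named step/readout functions (named so every statement shares one matcher)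
def pvOStep (h : Option (String × Int)) (x : String × Int) : Option (String × Int) :=
  some (match h with | none => x | some m => if m.2 < x.2 then x else m)

def pvReadout (o : Option (String × Int)) : String :=
  match o with | none => "unknown" | some t => if 0 < t.2 then t.1 else "unknown"

-- head of the insertion-sort fold = the fold of the head-level step
theorem head?_foldl_insertBy {α : Type} (before : α → α → Bool) (step : Option α → α → Option α)
    (hstep : ∀ (ys : List α) (x : α), (PySem.List.insertBy before x ys).head? = step ys.head? x) :
    ∀ (xs acc : List α),
      (xs.foldl (fun acc x => PySem.List.insertBy before x acc) acc).head? = xs.foldl step acc.head? := by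
  intro xs
  induction xs with
  | nil => intro acc; rfl
  | cons a t ih =>
    intro acc
    simp only [List.foldl_cons]
    rw [ih, hstep]

-- the concrete step: stable insertion by key -snd keeps the head unless the new pair strictly beats it
theorem ostep_insertBy (ys : List (String × Int)) (x : String × Int) :
    (PySem.List.insertBy (fun a b => decide ((-a.2 : Int) < -b.2)) x ys).head? = pvOStep ys.head? x := by
  cases ys with
  | nil => rfl
  | cons h t =>
    by_cases hlt : h.2 < x.2 <;>
      simp [PySem.List.insertBy, pvOStep, hlt, neg_lt_neg_iff]

-- invariant coupling the option-valued first-argmax state with the pair-valued running argmax state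
def pvRel (o : Option (String × Int)) (b : String × Int) : Prop :=
  (o = none ∧ b = ("unknown", 0)) ∨
  ∃ m, o = some m ∧ ((0 < m.2 ∧ b = m) ∨ (m.2 = 0 ∧ b = ("unknown", 0)))

theorem pvRel_fold :
    ∀ (xs : List (String × Int)) (o : Option (String × Int)) (b : String × Int),
      (∀ q ∈ xs, 0 ≤ q.2) → pvRel o b →
      pvRel (xs.foldl pvOStep o) (xs.foldl (fun b q => if b.2 < q.2 then q else b) b) := by
  intro xs
  induction xs with
  | nil => intro o b _ h; exact h
  | cons a t ih =>
    intro o b hnn hrel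
    simp only [List.foldl_cons]
    apply ih _ _ (fun q hq => hnn q (List.mem_cons_of_mem _ hq))
    have ha : 0 ≤ a.2 := hnn a (by simp)
    rcases hrel with ⟨ho, hb⟩ | ⟨m, ho, hm⟩
    · subst ho; subst hb
      by_cases hpos : (0 : Int) < a.2
      · exact Or.inr ⟨a, rfl, Or.inl ⟨hpos, by simp [hpos]⟩⟩
      · have hz : a.2 = 0 := le_antisymm (not_lt.mp hpos) ha
        exact Or.inr ⟨a, rfl, Or.inr ⟨hz, by simp [hpos]⟩⟩
    · subst ho
      rcases hm with ⟨hmpos, hb⟩ | ⟨hmz, hb⟩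
      · subst hb
        by_cases hlt : b.2 < a.2
        · exact Or.inr ⟨a, by simp [pvOStep, hlt], Or.inl ⟨lt_trans hmpos hlt, by simp [hlt]⟩⟩
        · exact Or.inr ⟨b, by simp [pvOStep, hlt], Or.inl ⟨hmpos, by simp [hlt]⟩⟩
      · subst hb
        by_cases hpos : (0 : Int) < a.2
        · have hlt : m.2 < a.2 := by omega
          exact Or.inr ⟨a, by simp [pvOStep, hlt], Or.inl ⟨hpos, by simp [hpos]⟩⟩
        · have hlt : ¬ m.2 < a.2 := by omega
          exact Or.inr ⟨m, by simp [pvOStep, hlt], Or.inr ⟨hmz, by simp [hpos]⟩⟩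

-- readout: B's head check on the first-argmax equals the running argmax's first component
theorem argmax_readout (xs : List (String × Int)) (hnn : ∀ q ∈ xs, 0 ≤ q.2) :
    pvReadout (xs.foldl pvOStep none)
      = (xs.foldl (fun b q => if b.2 < q.2 then q else b) ("unknown", 0)).1 := by
  have h := pvRel_fold xs none ("unknown", 0) hnn (Or.inl ⟨rfl, rfl⟩)
  rcases h with ⟨ho, hb⟩ | ⟨m, ho, hm⟩
  · rw [ho, hb]; rfl
  · rw [ho]
    rcases hm with ⟨hp, hb⟩ | ⟨hz, hb⟩
    · rw [hb]; simp [pvReadout, hp]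
    · rw [hb]; simp [pvReadout, hz]

-- the head-of-list match B writes, through head?
theorem match_head? (ranked : List (String × Int)) :
    (match ranked with | [] => "unknown" | t :: _ => if 0 < t.2 then t.1 else "unknown")
      = pvReadout ranked.head? := by
  cases ranked <;> rfl

-- ===== VERDICT (by name: the statement is the Claim_ definition above) =====
theorem tag_niche_py_spec : Claim_equal_tag_niche_py := by
  intro caption l _ hpre
  unfold Spec_tag_niche_py tag_niche_py_alt
  simp only [hits_eq]
  rw [A_eq_argmax caption l hpre, match_head?]
  have hsort : ∀ (xs : List (String × Int)),
      (PySem.List.sorted xs (fun t => -t.2)).head? = xs.foldl pvOStep none := by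
    intro xs
    rw [PySem.List.sorted_eq_foldl_insertBy]
    exact head?_foldl_insertBy _ pvOStep ostep_insertBy xs []
  rw [hsort]
  rw [argmax_readout _ (by
    intro q hq
    rcases List.mem_map.mp hq with ⟨p, _, hpq⟩
    rw [← hpq]
    exact pvHits_nonneg (PySem.Str.lower caption) p)]
  rw [List.foldl_map]
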